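-- pv_equiv track=rewrite | github.com/AshvinKooner/Polynomial | poly div.py | parse_terms
-- ===== SOURCE A (Python) =====
-- def parse_terms(terms):
--     parsed_terms = []
--     for term in terms:
--         if "x" in term:
--             if "^" in term:
--                 # Power of x
--                 split = "x^"
--             else:
--                 # Without a power
--                 split = "x"
--             coeff, power = term.split(split)
--             if coeff == "-":
--                 # Negative - no digit present
--                 coeff = -1
--             elif len(coeff) > 0:
--                 # Digit(s) present
--                 coeff = int(coeff)
--             else:
--                 # Positive - no digit present
--                 coeff = 1
--             #coeff = int(coeff) if len(coeff) > 0 else 1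
--             power = int(power) if len(power) > 0 else 1
--             parsed_terms.append((coeff, power))
--         else:
--             # Term is just a constant
--             parsed_terms.append((int(term), 0))
--     return parsed_terms
-- ===== SOURCE B (Python) =====
-- def parse_terms(terms):
--     return [_parse_term(term) for term in terms]
--
--
-- def _parse_term(term):
--     # single left-to-right scan: collect coefficient chars until the first 'x'
--     coeff_chars = []
--     i = 0
--     while i < len(term) and term[i] != "x":
--         coeff_chars.append(term[i])
--         i += 1
--     if i == len(term):
--         # no 'x': the term is a constant
--         return (int(term), 0)
--     rest = list(term[i + 1:])
--     if rest[:1] == ["^"]: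
--         rest = rest[1:]
--     c = "".join(coeff_chars)
--     if c == "-":
--         coeff = -1
--     elif c:
--         coeff = int(c)
--     else:
--         coeff = 1
--     power = int("".join(rest)) if rest else 1
--     return (coeff, power)
-- ===== Notes on version B (the rewrite author's own statement) =====
-- stated objective: alternative
-- what changed: B replaces A's two membership tests plus str.split with tuple-unpacking by a single left-to-right scan to the first 'x' followed by direct slicing (optionally stripping one leading '^'), handling both the plain and the powered form in one code path.
import Mathlib
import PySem

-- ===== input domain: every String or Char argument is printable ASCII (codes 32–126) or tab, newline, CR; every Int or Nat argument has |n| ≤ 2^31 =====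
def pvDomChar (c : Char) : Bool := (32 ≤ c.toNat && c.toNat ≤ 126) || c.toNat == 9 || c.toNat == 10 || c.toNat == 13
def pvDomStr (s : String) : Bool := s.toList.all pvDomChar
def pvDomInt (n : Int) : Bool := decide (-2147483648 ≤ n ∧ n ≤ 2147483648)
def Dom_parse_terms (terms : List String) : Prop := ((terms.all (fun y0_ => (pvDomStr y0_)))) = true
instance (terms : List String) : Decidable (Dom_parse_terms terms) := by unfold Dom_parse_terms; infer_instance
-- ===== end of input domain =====

-- B replaces A's membership-test + split + tuple-unpack parsing by a single left-to-right
-- scan to the first 'x' with direct slicing (objective: alternative; same cost).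

-- ===== PORT A =====
-- loop body of A's for-loop
def stepA (parsed : List (Int × Int)) (term : String) : List (Int × Int) :=
  if PySem.Str.isIn "x" term then
    let sep := if PySem.Str.isIn "^" term then "x^" else "x"
    match PySem.Str.split? term sep with
    | some [coeff, power] =>
        let coeffI : Int :=
          if coeff = "-" then -1
          else if 0 < PySem.Str.len coeff then (PySem.Int.ofStr? coeff).getD 0
          else 1
        let powerI : Int :=
          if 0 < PySem.Str.len power then (PySem.Int.ofStr? power).getD 0 else 1
        parsed ++ [(coeffI, powerI)]
    | _ => parsed        -- ValueError (split does not give exactly 2 parts); outside Pre_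
  else
    parsed ++ [((PySem.Int.ofStr? term).getD 0, 0)]

def parse_terms (terms : List String) : List (Int × Int) :=
  terms.foldl stepA []

-- ===== PORT B =====
-- the while-loop of _parse_term: chars before the first 'x', and the rest from that 'x'
def scanCoeff (cs : List Char) : List Char × List Char :=
  match cs with
  | [] => ([], [])
  | ch :: rest =>
    if ch = 'x' then ([], ch :: rest)
    else
      let p := scanCoeff rest
      (ch :: p.1, p.2)

def parseTermB (term : String) : Int × Int :=
  let p := scanCoeff term.toList
  match p.2 with
  | [] => ((PySem.Int.ofStr? term).getD 0, 0)
  | _ :: tl =>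
    let rest := if tl.take 1 = ['^'] then tl.tail else tl
    let c := p.1
    let coeff : Int := if c = ['-'] then -1 else if c ≠ [] then (PySem.Int.ofChars? c).getD 0 else 1
    let power : Int := if rest ≠ [] then (PySem.Int.ofChars? rest).getD 0 else 1
    (coeff, power)

def parse_terms_alt (terms : List String) : List (Int × Int) :=
  terms.map parseTermB

-- ===== PRECONDITION & SPEC =====
-- Pre_ excludes exactly the terms on which A raises ValueError (split not yielding two
-- parts, or int() on a non-numeric piece); it admits every input A returns on.
def termOk (t : String) : Bool :=
  let cs := t.toList
  let c := cs.takeWhile (fun ch => ch != 'x')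
  match cs.dropWhile (fun ch => ch != 'x') with
  | [] => (PySem.Int.ofChars? cs).isSome
  | _ :: tl =>
    let s := if tl.take 1 = ['^'] then tl.tail else tl
    !(tl.contains 'x') && !(c.contains '^') && !(s.contains '^') &&
    (c == ['-'] || c == [] || (PySem.Int.ofChars? c).isSome) &&
    (s == [] || (PySem.Int.ofChars? s).isSome)

def Pre_parse_terms (terms : List String) : Prop := terms.all termOk = true
instance (terms : List String) : Decidable (Pre_parse_terms terms) := by
  unfold Pre_parse_terms; infer_instance

def pvWitness_parse_terms : List String := ["3x^2", "-x", "x^10", "-7", "2x"]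

def Spec_parse_terms (terms : List String) (out : List (Int × Int)) : Prop := out = parse_terms_alt terms
instance (terms : List String) (out : List (Int × Int)) : Decidable (Spec_parse_terms terms out) := by
  unfold Spec_parse_terms; infer_instance

-- ===== CLAIM (what is proved, stated in full; the proofs are below) =====
def Claim_equal_parse_terms : Prop :=
  ∀ (terms : List String), Dom_parse_terms terms → Pre_parse_terms terms →
    Spec_parse_terms terms (parse_terms terms)

-- ===== LEMMAS AND PROOFS =====

lemma scanCoeff_eq (cs : List Char) :
    scanCoeff cs = (cs.takeWhile (fun ch => ch != 'x'), cs.dropWhile (fun ch => ch != 'x')) := by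
  induction cs with
  | nil => rfl
  | cons ch rest ih =>
    by_cases h : ch = 'x' <;> simp [scanCoeff, h, ih]

lemma beq_false_of_not_mem (x ch : Char) (rest : List Char) (h : x ∉ ch :: rest) :
    (x == ch) = false := by
  simp only [List.mem_cons, not_or] at h
  rw [beq_eq_false_iff_ne]; exact h.1

lemma go_not_mem (x : Char) (sep' l cur : List Char) (acc : List (List Char)) (fuel : Nat)
    (h : x ∉ l) :
    PySem.Chars.splitOn.go (x :: sep') fuel l cur acc = ((cur.reverse ++ l) :: acc).reverse := by
  induction l generalizing fuel cur with
  | nil => rw [PySem.Chars.splitOn.go.eq_def]; cases fuel <;> simp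
  | cons ch rest ih =>
    cases fuel with
    | zero => rw [PySem.Chars.splitOn.go.eq_def]
    | succ f =>
      rw [PySem.Chars.splitOn.go.eq_def]
      simp only [List.isPrefixOf, beq_false_of_not_mem x ch rest h, Bool.false_and,
        Bool.false_eq_true, if_false]
      rw [ih (fuel := f) (cur := ch :: cur) (fun hm => h (List.mem_cons_of_mem _ hm))]
      simp

lemma go_occ (x : Char) (sep' cpre s cur : List Char) (acc : List (List Char)) (fuel : Nat)
    (hc : x ∉ cpre) (hf : cpre.length + 1 ≤ fuel) :
    PySem.Chars.splitOn.go (x :: sep') fuel (cpre ++ (x :: sep') ++ s) cur acc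
      = PySem.Chars.splitOn.go (x :: sep') (fuel - (cpre.length + 1)) s []
          ((cur.reverse ++ cpre) :: acc) := by
  induction cpre generalizing fuel cur with
  | nil =>
    obtain ⟨f, rfl⟩ : ∃ f, fuel = f + 1 := ⟨fuel - 1, by omega⟩
    rw [PySem.Chars.splitOn.go.eq_def]
    simp
  | cons ch rest ih =>
    obtain ⟨f, rfl⟩ : ∃ f, fuel = f + 1 := ⟨fuel - 1, by omega⟩
    rw [PySem.Chars.splitOn.go.eq_def]
    simp only [List.cons_append, List.isPrefixOf, beq_false_of_not_mem x ch rest hc,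
      Bool.false_and, Bool.false_eq_true, if_false]
    have hrec := ih (fuel := f) (cur := ch :: cur) (fun hm => hc (List.mem_cons_of_mem _ hm))
      (by simp only [List.length_cons] at hf; omega)
    rw [show rest ++ x :: sep' ++ s = rest ++ (x :: sep') ++ s by simp, hrec]
    have : f - (rest.length + 1) = f + 1 - (rest.length + 1 + 1) := by omega
    rw [this]
    simp

lemma splitOn_once (x : Char) (sep' cpre s : List Char) (hc : x ∉ cpre) (hs : x ∉ s) :
    PySem.Chars.splitOn (cpre ++ (x :: sep') ++ s) (x :: sep') = [cpre, s] := by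
  unfold PySem.Chars.splitOn
  rw [go_occ x sep' cpre s [] [] _ hc (by simp)]
  rw [go_not_mem x sep' s [] _ _ hs]
  simp

lemma dropWhile_head (cs tl : List Char) (hd : Char)
    (h : cs.dropWhile (fun ch => ch != 'x') = hd :: tl) : hd = 'x' := by
  have := List.head_dropWhile_not (p := fun ch => ch != 'x') (l := cs) (by simp [h])
  simp [h] at this; exact this

lemma ofList_eq_dash_iff (c : List Char) : String.ofList c = "-" ↔ c = ['-'] := by
  constructor
  · intro h; have := congrArg String.toList h; simpa using this
  · rintro rfl; decide

def coeffVal (c : List Char) : Int :=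
  if c = ['-'] then -1 else if c ≠ [] then (PySem.Int.ofChars? c).getD 0 else 1

def powVal (s : List Char) : Int :=
  if s ≠ [] then (PySem.Int.ofChars? s).getD 0 else 1

lemma pair_eq (c s : List Char) :
    ((if String.ofList c = "-" then (-1 : Int)
      else if 0 < PySem.Str.len (String.ofList c) then (PySem.Int.ofStr? (String.ofList c)).getD 0
      else 1),
     (if 0 < PySem.Str.len (String.ofList s) then (PySem.Int.ofStr? (String.ofList s)).getD 0
      else 1))
    = (coeffVal c, powVal s) := by
  unfold coeffVal powVal
  by_cases h1 : c = ['-'] <;> by_cases h2 : c = [] <;> by_cases h3 : s = [] <;>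
    simp_all [ofList_eq_dash_iff, PySem.Str.len_eq, PySem.Int.ofStr?, List.length_pos_iff]

lemma parseTermB_cons (t : String) (tl : List Char)
    (hsplit : t.toList.dropWhile (fun ch => ch != 'x') = 'x' :: tl) :
    parseTermB t = (coeffVal (t.toList.takeWhile (fun ch => ch != 'x')),
      powVal (if tl.take 1 = ['^'] then tl.tail else tl)) := by
  simp [parseTermB, scanCoeff_eq, hsplit, coeffVal, powVal]

lemma chars_isIn_single_true (ch : Char) (l : List Char) (hmem : ch ∈ l) :
    PySem.Chars.isIn [ch] l = true := by
  rw [PySem.Chars.isIn_iff_infix, List.singleton_infix_iff]; exact hmem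

lemma chars_isIn_single_false (ch : Char) (l : List Char) (hmem : ch ∉ l) :
    PySem.Chars.isIn [ch] l = false := by
  rw [PySem.Chars.isIn_eq_false_iff, List.singleton_infix_iff]; exact hmem

lemma split?_once (t : String) (sep : String) (x : Char) (sep' cpre s : List Char)
    (hsep : sep.toList = x :: sep') (hdec : t.toList = cpre ++ (x :: sep') ++ s)
    (hc : x ∉ cpre) (hs : x ∉ s) :
    PySem.Str.split? t sep = some [String.ofList cpre, String.ofList s] := by
  unfold PySem.Str.split? PySem.Chars.split?
  rw [hsep, hdec, splitOn_once x sep' cpre s hc hs]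
  rfl

lemma step_eq (parsed : List (Int × Int)) (t : String) (h : termOk t = true) :
    stepA parsed t = parsed ++ [parseTermB t] := by
  have hdecomp := List.takeWhile_append_dropWhile
    (p := fun ch => ch != 'x') (l := t.toList)
  have hxc : 'x' ∉ t.toList.takeWhile (fun ch => ch != 'x') := by
    intro hm
    have := List.mem_takeWhile_imp hm
    simp at this
  rcases hsplit : t.toList.dropWhile (fun ch => ch != 'x') with _ | ⟨hd, tl⟩
  · -- no 'x' in the term: both sides take the constant branch
    have hnox : 'x' ∉ t.toList := by
      rw [hsplit, List.append_nil] at hdecomp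
      rw [← hdecomp]; exact hxc
    have hx := chars_isIn_single_false 'x' t.toList hnox
    have hxs : ("x" : String).toList = ['x'] := by decide
    simp [stepA, PySem.Str.isIn_eq, hxs, hx, parseTermB, scanCoeff_eq, hsplit]
  · -- the term contains 'x'
    obtain rfl : hd = 'x' := dropWhile_head _ _ _ hsplit
    rw [hsplit] at hdecomp
    set c := t.toList.takeWhile (fun ch => ch != 'x') with hcdef
    have hmem : 'x' ∈ t.toList := by rw [← hdecomp]; simp
    have hx := chars_isIn_single_true 'x' t.toList hmem
    have hxs : ("x" : String).toList = ['x'] := by decide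
    have hxcar : ("x^" : String).toList = ['x', '^'] := by decide
    simp only [termOk, hsplit, Bool.and_eq_true, Bool.not_eq_eq_eq_not, Bool.not_true,
      List.contains_eq_mem, decide_eq_false_iff_not, Bool.or_eq_true, beq_iff_eq] at h
    obtain ⟨⟨⟨⟨hxtl, hcarc⟩, hcars⟩, hcoeff⟩, hpow⟩ := h
    rcases tl with _ | ⟨e, tl'⟩
    · -- term ends in 'x': split on "x", empty power part
      have hcarf : PySem.Chars.isIn ['^'] t.toList = false := by
        apply chars_isIn_single_false
        rw [← hdecomp]
        simp only [List.mem_append, List.mem_cons, List.not_mem_nil]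
        rintro (hmc | hc | hc) <;> simp_all
      have hdec : t.toList = c ++ ('x' :: []) ++ [] := by
        rw [← hdecomp]; simp
      have hsp := split?_once t "x" 'x' [] c [] hxs hdec hxc (by simp)
      have hcs : ("^" : String).toList = ['^'] := by decide
      rw [parseTermB_cons t [] hsplit]
      simp only [stepA, PySem.Str.isIn_eq, hxs, hcs, hx, if_true, hcarf,
        Bool.false_eq_true, if_false, hsp, pair_eq]
      simp [powVal]
      rw [← hcdef]
    · by_cases he : e = '^'
      · -- power part present: split on "x^"
        subst he
        have hcart : PySem.Chars.isIn ['^'] t.toList = true := by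
          apply chars_isIn_single_true
          rw [← hdecomp]; simp
        have hdec : t.toList = c ++ ('x' :: ['^']) ++ tl' := by
          rw [← hdecomp]; simp
        have hs' : 'x' ∉ tl' := fun hm => hxtl (List.mem_cons_of_mem _ hm)
        have hsp := split?_once t "x^" 'x' ['^'] c tl' hxcar hdec hxc hs'
        have hcs : ("^" : String).toList = ['^'] := by decide
        rw [parseTermB_cons t ('^' :: tl') hsplit]
        simp only [stepA, PySem.Str.isIn_eq, hxs, hcs, hx, if_true, hcart, hsp, pair_eq]
        simp
        rw [← hcdef]
      · -- no '^' right after the 'x': split on "x", power part is the tail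
        have hcarf : PySem.Chars.isIn ['^'] t.toList = false := by
          apply chars_isIn_single_false
          rw [← hdecomp]
          have htk : (e :: tl').take 1 = ['^'] ↔ e = '^' := by simp
          simp only [htk, he, if_false] at hcars
          simp only [List.mem_append, List.mem_cons]
          rintro (hmc | hc | hc) <;> simp_all
        have hdec : t.toList = c ++ ('x' :: []) ++ (e :: tl') := by
          rw [← hdecomp]; simp
        have hsp := split?_once t "x" 'x' [] c (e :: tl') hxs hdec hxc hxtl
        have hcs : ("^" : String).toList = ['^'] := by decide
        rw [parseTermB_cons t (e :: tl') hsplit]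
        simp only [stepA, PySem.Str.isIn_eq, hxs, hcs, hx, if_true, hcarf,
          Bool.false_eq_true, if_false, hsp, pair_eq]
        simp [he]
        rw [← hcdef]

lemma foldl_stepA (terms : List String) (acc : List (Int × Int))
    (h : terms.all termOk = true) :
    terms.foldl stepA acc = acc ++ terms.map parseTermB := by
  induction terms generalizing acc with
  | nil => simp
  | cons t ts ih =>
    simp only [List.all_cons, Bool.and_eq_true] at h
    rw [List.foldl_cons, step_eq _ _ h.1, ih _ h.2, List.map_cons]
    simp

-- ===== VERDICT (by name: the statement is the Claim_ definition above) =====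
theorem parse_terms_spec : Claim_equal_parse_terms := by
  intro terms _ hpre
  unfold Spec_parse_terms parse_terms parse_terms_alt
  rw [foldl_stepA _ _ hpre]
  simp
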